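-- pv_equiv track=rewrite | github.com/pokemaster345x/Codeforces-Solutions | codeforces/Training Camp Medellín 2024/Contest Avanzado [Día 1]/xd.py | mueltos
-- ===== SOURCE A (Python) =====
-- def mueltos(s):
--     n=len(s)
--     bombillasmueltas={'R':0,"B":0,"Y":0,"G":0}
--     posiciones={'R':-10,"B":-10,"Y":-10,"G":-10}
--     for i in range(n):
--         if s[i] in posiciones:
--             posiciones[s[i]]=i%4
--     for i in range(n):
--         if s[i]=='!':
--             pos=i%4
--             for color,p in posiciones.items():
--                 if p==pos:
--                     bombillasmueltas[color]+=1
--     return bombillasmueltas["B"],bombillasmueltas["R"],bombillasmueltas["Y"],bombillasmueltas['G']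
-- ===== SOURCE B (Python) =====
-- def mueltos(s):
--     # One pass: histogram of exclamation marks by index residue mod 4, plus each
--     # color's last-occurrence residue (-1 = never seen).  Answers are then
--     # direct lookups instead of A's scan with an inner color loop.
--     count = [0, 0, 0, 0]
--     pos = {'R': -1, 'B': -1, 'Y': -1, 'G': -1}
--     for i, c in enumerate(s):
--         if c == '!':
--             count[i % 4] += 1
--         elif c in pos:
--             pos[c] = i % 4
--
--     def tally(color):
--         p = pos[color]
--         return count[p] if p >= 0 else 0
--
--     return tally('B'), tally('R'), tally('Y'), tally('G')
-- ===== Notes on version B (the rewrite author's own statement) =====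
-- stated objective: alternative
-- what changed: Single pass building a residue-mod-4 histogram of the exclamation marks and each color's last-occurrence residue, then four direct lookups, replacing A's two full scans with an inner loop over the four colors per mark.
import Mathlib
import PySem

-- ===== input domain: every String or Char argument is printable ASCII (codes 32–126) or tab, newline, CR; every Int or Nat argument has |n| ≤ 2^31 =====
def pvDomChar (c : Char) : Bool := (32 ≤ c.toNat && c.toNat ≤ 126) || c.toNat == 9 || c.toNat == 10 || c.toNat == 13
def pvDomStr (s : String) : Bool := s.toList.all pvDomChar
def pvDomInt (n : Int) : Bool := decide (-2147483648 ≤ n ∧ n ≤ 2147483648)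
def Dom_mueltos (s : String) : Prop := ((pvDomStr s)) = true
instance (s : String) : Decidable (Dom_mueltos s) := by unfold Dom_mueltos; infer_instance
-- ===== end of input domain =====

-- B replaces A's two full scans (with an inner loop over the four colors per mark)
-- by a single pass building a residue-mod-4 histogram of the exclamation marks and
-- each color's last-occurrence residue, then four direct lookups (same cost class).


-- ===== PORT A =====
def mueltos (s : String) : Int × Int × Int × Int :=
  let n : Int := PySem.Str.len s
  let bomb0 : PySem.Dict Char Int := PySem.Dict.ofList [('R', 0), ('B', 0), ('Y', 0), ('G', 0)]
  let posi0 : PySem.Dict Char Int := PySem.Dict.ofList [('R', -10), ('B', -10), ('Y', -10), ('G', -10)]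
  let posi := (PySem.List.pyRange 0 n 1).foldl (fun d i =>
      if d.contains (PySem.List.pyGetD s.toList i ' ') then
        d.insert (PySem.List.pyGetD s.toList i ' ') (PySem.Int.mod i 4)
      else d) posi0
  let bomb := (PySem.List.pyRange 0 n 1).foldl (fun b i =>
      if PySem.List.pyGetD s.toList i ' ' = '!' then
        let pos := PySem.Int.mod i 4
        posi.items.foldl (fun b cp =>
          if cp.2 = pos then b.insert cp.1 (b.getD cp.1 0 + 1) else b) b
      else b) bomb0
  (bomb.getD 'B' 0, bomb.getD 'R' 0, bomb.getD 'Y' 0, bomb.getD 'G' 0)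

-- ===== PORT B =====
def mueltos_alt (s : String) : Int × Int × Int × Int :=
  let st := (PySem.List.enumerate s.toList 0).foldl
    (fun (st : List Int × PySem.Dict Char Int) p =>
      if p.2 = '!' then
        (PySem.List.pySetD st.1 (PySem.Int.mod p.1 4)
           (PySem.List.pyGetD st.1 (PySem.Int.mod p.1 4) 0 + 1), st.2)
      else if st.2.contains p.2 then (st.1, st.2.insert p.2 (PySem.Int.mod p.1 4))
      else st)
    ([0, 0, 0, 0], PySem.Dict.ofList [('R', -1), ('B', -1), ('Y', -1), ('G', -1)])
  let tally := fun (c : Char) =>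
    let p := st.2.getD c (-1)
    if 0 ≤ p then PySem.List.pyGetD st.1 p 0 else 0
  (tally 'B', tally 'R', tally 'Y', tally 'G')

-- ===== PRECONDITION & SPEC =====
def Spec_mueltos (s : String) (out : Int × Int × Int × Int) : Prop := out = mueltos_alt s
instance (s : String) (out : Int × Int × Int × Int) : Decidable (Spec_mueltos s out) := by unfold Spec_mueltos; infer_instance

-- ===== CLAIM (what is proved, stated in full; the proofs are below) =====
def Claim_equal_mueltos : Prop := ∀ (s : String), Dom_mueltos s → Spec_mueltos s (mueltos s)

-- ===== LEMMAS AND PROOFS =====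

-- enumerated character list of s
def enumL (s : String) : List (Int × Char) := PySem.List.enumerate s.toList

-- the four step functions of the two ports, named for the proofs
def posStep (d : PySem.Dict Char Int) (p : Int × Char) : PySem.Dict Char Int :=
  if d.contains p.2 then d.insert p.2 (PySem.Int.mod p.1 4) else d

def innerStep (pos : Int) (b : PySem.Dict Char Int) (cp : Char × Int) : PySem.Dict Char Int :=
  if cp.2 = pos then b.insert cp.1 (b.getD cp.1 0 + 1) else b

def bombStep (its : List (Char × Int)) (b : PySem.Dict Char Int) (p : Int × Char) : PySem.Dict Char Int :=
  if p.2 = '!' then its.foldl (innerStep (PySem.Int.mod p.1 4)) b else b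

def cntStep (c : List Int) (p : Int × Char) : List Int :=
  if p.2 = '!' then
    PySem.List.pySetD c (PySem.Int.mod p.1 4) (PySem.List.pyGetD c (PySem.Int.mod p.1 4) 0 + 1)
  else c

def posStepB (d : PySem.Dict Char Int) (p : Int × Char) : PySem.Dict Char Int :=
  if p.2 = '!' then d else if d.contains p.2 then d.insert p.2 (PySem.Int.mod p.1 4) else d

-- last-occurrence residue of color c, accumulator a
def lastRes (l : List (Int × Char)) (c : Char) (a : Int) : Int :=
  l.foldl (fun acc p => if p.2 = c then PySem.Int.mod p.1 4 else acc) a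

-- number of '!' entries whose index residue is r
def bangCnt (l : List (Int × Char)) (r : Int) : Int :=
  (l.countP (fun p => p.2 == '!' && (PySem.Int.mod p.1 4 == r)) : Int)

lemma mod4_bounds (i : Int) : 0 ≤ PySem.Int.mod i 4 ∧ PySem.Int.mod i 4 < 4 := by
  unfold PySem.Int.mod
  rw [Int.fmod_eq_emod]
  have := Int.emod_nonneg i (by norm_num : (4:Int) ≠ 0)
  have := Int.emod_lt_of_pos i (by norm_num : (0:Int) < 4)
  simp
  omega

lemma lastRes_nil (c : Char) (a : Int) : lastRes [] c a = a := rfl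

lemma lastRes_cons (p : Int × Char) (l : List (Int × Char)) (c : Char) (a : Int) :
    lastRes (p :: l) c a = lastRes l c (if p.2 = c then PySem.Int.mod p.1 4 else a) := rfl

lemma bangCnt_cons (p : Int × Char) (l : List (Int × Char)) (r : Int) :
    bangCnt (p :: l) r
      = bangCnt l r + (if p.2 = '!' ∧ PySem.Int.mod p.1 4 = r then 1 else 0) := by
  simp only [bangCnt, List.countP_cons]
  by_cases h1 : p.2 = '!' <;> by_cases h2 : PySem.Int.mod p.1 4 = r <;>
    simp [h1, h2] <;> omega

lemma bangCnt_neg (l : List (Int × Char)) (r : Int) (hr : r < 0) : bangCnt l r = 0 := by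
  induction l with
  | nil => rfl
  | cons p l ih =>
    rw [bangCnt_cons, ih]
    have := mod4_bounds p.1
    split_ifs with h
    · omega
    · omega

-- ===== first loop: items characterization =====
lemma posi_items (l : List (Int × Char)) (d : PySem.Dict Char Int) (hnd : d.keys.Nodup) :
    (l.foldl posStep d).items = d.items.map (fun q => (q.1, lastRes l q.1 q.2)) := by
  induction l generalizing d with
  | nil => simp [lastRes_nil]
  | cons p l ih =>
    rw [List.foldl_cons]
    by_cases h : d.contains p.2 = true
    · have hstep : posStep d p = d.insert p.2 (PySem.Int.mod p.1 4) := by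
        simp [posStep, h]
      rw [hstep, ih _ (by rw [PySem.Dict.keys_insert_of_contains d _ h]; exact hnd),
          PySem.Dict.items_insert_of_contains d _ h, List.map_map]
      apply List.map_congr_left
      intro q _
      by_cases hq : q.1 = p.2
      · simp [hq, lastRes_cons]
      · have hne : ¬ p.2 = q.1 := fun h => hq h.symm
        have hb : (q.1 == p.2) = false := by simp [hq]
        simp [Function.comp, hb, lastRes_cons, if_neg hne]
    · have hstep : posStep d p = d := by simp [posStep, h]
      rw [hstep, ih _ hnd]
      apply List.map_congr_left
      intro q hq
      have hkey : q.1 ∈ d.keys := by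
        simp [PySem.Dict.keys]
        exact ⟨q.2, by simpa using hq⟩
      have hne : p.2 ≠ q.1 := by
        intro hEq
        rw [PySem.Dict.contains_iff_mem_keys] at h
        exact h (hEq ▸ hkey)
      simp [lastRes_cons, hne]

-- ===== second loop: inner fold =====
lemma inner_skip (its : List (Char × Int)) (b : PySem.Dict Char Int) (pos : Int) (x : Char)
    (hx : x ∉ its.map Prod.fst) :
    (its.foldl (innerStep pos) b).getD x 0 = b.getD x 0 := by
  induction its generalizing b with
  | nil => rfl
  | cons q rest ih =>
    simp only [List.map_cons, List.mem_cons] at hx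
    push_neg at hx
    rw [List.foldl_cons, ih _ hx.2]
    unfold innerStep
    split_ifs with h
    · rw [PySem.Dict.getD_insert]
      simp [hx.1]
    · rfl

lemma inner_getD (its : List (Char × Int)) (b : PySem.Dict Char Int) (pos : Int) (x : Char)
    (px : Int) (hx : (x, px) ∈ its) (hnd : (its.map Prod.fst).Nodup) :
    (its.foldl (innerStep pos) b).getD x 0
      = b.getD x 0 + (if px = pos then 1 else 0) := by
  induction its generalizing b with
  | nil => simp at hx
  | cons q rest ih =>
    simp only [List.map_cons, List.nodup_cons] at hnd
    rcases List.mem_cons.mp hx with hq | hrest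
    · have hq1 : q = (x, px) := hq.symm
      subst hq1
      have hxnot : x ∉ rest.map Prod.fst := hnd.1
      rw [List.foldl_cons, inner_skip rest _ pos x hxnot]
      unfold innerStep
      split_ifs with h
      · rw [PySem.Dict.getD_insert]; simp
      · simp
    · have hxmem : x ∈ rest.map Prod.fst := List.mem_map.mpr ⟨(x, px), hrest, rfl⟩
      have hne : q.1 ≠ x := fun hEq => hnd.1 (hEq ▸ hxmem)
      rw [List.foldl_cons]
      have : (innerStep pos b q).getD x 0 = b.getD x 0 := by
        unfold innerStep
        split_ifs with h
        · rw [PySem.Dict.getD_insert,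
              if_neg (show ¬ x = q.1 from fun hEq => hne hEq.symm)]
        · rfl
      rw [ih _ hrest hnd.2, this]

-- ===== second loop: outer fold =====
lemma bomb_getD (l : List (Int × Char)) (its : List (Char × Int)) (b : PySem.Dict Char Int)
    (x : Char) (px : Int) (hx : (x, px) ∈ its) (hnd : (its.map Prod.fst).Nodup) :
    (l.foldl (bombStep its) b).getD x 0 = b.getD x 0 + bangCnt l px := by
  induction l generalizing b with
  | nil => simp [bangCnt]
  | cons p l ih =>
    rw [List.foldl_cons, bangCnt_cons]
    by_cases h : p.2 = '!'
    · have hstep : bombStep its b p = its.foldl (innerStep (PySem.Int.mod p.1 4)) b := by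
        simp [bombStep, h]
      rw [hstep, ih _, inner_getD its b _ x px hx hnd]
      split_ifs with h1 h2 h2 <;> simp_all <;> omega
    · have hstep : bombStep its b p = b := by simp [bombStep, h]
      rw [hstep, ih _]
      simp [h]

-- ===== B: pair fold splits =====
lemma pairfold_split (l : List (Int × Char)) (cnt : List Int) (d : PySem.Dict Char Int) :
    l.foldl (fun (st : List Int × PySem.Dict Char Int) p =>
      if p.2 = '!' then
        (PySem.List.pySetD st.1 (PySem.Int.mod p.1 4)
           (PySem.List.pyGetD st.1 (PySem.Int.mod p.1 4) 0 + 1), st.2)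
      else if st.2.contains p.2 then (st.1, st.2.insert p.2 (PySem.Int.mod p.1 4))
      else st) (cnt, d)
    = (l.foldl cntStep cnt, l.foldl posStepB d) := by
  induction l generalizing cnt d with
  | nil => rfl
  | cons p l ih =>
    rw [List.foldl_cons, List.foldl_cons, List.foldl_cons]
    have hstep : (if p.2 = '!' then
        (PySem.List.pySetD cnt (PySem.Int.mod p.1 4)
           (PySem.List.pyGetD cnt (PySem.Int.mod p.1 4) 0 + 1), d)
      else if d.contains p.2 then (cnt, d.insert p.2 (PySem.Int.mod p.1 4))
      else (cnt, d)) = (cntStep cnt p, posStepB d p) := by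
      unfold cntStep posStepB
      split_ifs <;> rfl
    rw [hstep]
    exact ih _ _

-- B's position loop coincides with A's when '!' is not a key
lemma posB_eq_posA (l : List (Int × Char)) (d : PySem.Dict Char Int)
    (h : d.contains '!' = false) :
    l.foldl posStepB d = l.foldl posStep d := by
  induction l generalizing d with
  | nil => rfl
  | cons p l ih =>
    rw [List.foldl_cons, List.foldl_cons]
    by_cases hb : p.2 = '!'
    · have h1 : posStepB d p = d := by simp [posStepB, hb]
      have h2 : posStep d p = d := by simp [posStep, hb, h]
      rw [h1, h2, ih _ h]
    · have h1 : posStepB d p = posStep d p := by simp [posStepB, posStep, hb]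
      rw [h1]
      by_cases hc : d.contains p.2 = true
      · have : posStep d p = d.insert p.2 (PySem.Int.mod p.1 4) := by simp [posStep, hc]
        rw [this] at *
        apply ih
        have hne : ('!' == p.2) = false :=
          beq_eq_false_iff_ne.mpr (fun hEq => hb hEq.symm)
        rw [PySem.Dict.contains_insert, hne, h]
        decide
      · have : posStep d p = d := by simp [posStep, hc]
        rw [this]; exact ih _ h

-- ===== B: count list characterization =====
lemma cnt_getD (l : List (Int × Char)) (cnt : List Int) (h4 : cnt.length = 4)
    (r : Int) (hr0 : 0 ≤ r) (hr : r < 4) :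
    PySem.List.pyGetD (l.foldl cntStep cnt) r 0
      = PySem.List.pyGetD cnt r 0 + bangCnt l r := by
  induction l generalizing cnt with
  | nil => simp [bangCnt]
  | cons p l ih =>
    rw [List.foldl_cons, bangCnt_cons]
    by_cases h : p.2 = '!'
    · have hmB := mod4_bounds p.1
      have hstep : cntStep cnt p
          = PySem.List.pySetD cnt (PySem.Int.mod p.1 4)
              (PySem.List.pyGetD cnt (PySem.Int.mod p.1 4) 0 + 1) := by
        simp only [cntStep, if_pos h]
      generalize hm : PySem.Int.mod p.1 4 = m at *
      have h4' : (PySem.List.pySetD cnt m (PySem.List.pyGetD cnt m 0 + 1)).length = 4 := by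
        rw [PySem.List.length_pySetD]; exact h4
      rw [hstep, ih _ h4']
      have hmc : m = ((m.toNat : Nat) : Int) := by omega
      have hrc : r = ((r.toNat : Nat) : Int) := by omega
      rw [hmc, hrc, PySem.List.pyGetD_pySetD_natCast _ _ _ _ _ (by omega)]
      by_cases he : r.toNat = m.toNat
      · rw [if_pos he, if_pos ⟨h, by omega⟩, he]
        omega
      · rw [if_neg he, if_neg (by exact fun hc => he (by omega))]
        omega
    · have hstep : cntStep cnt p = cnt := by simp [cntStep, h]
      rw [hstep, ih _ h4]
      simp [h]

-- ===== lastRes relations =====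
lemma lastRes_cases (l : List (Int × Char)) (c : Char) :
    ∀ a b : Int, (lastRes l c a = a ∧ lastRes l c b = b)
      ∨ (lastRes l c a = lastRes l c b ∧ 0 ≤ lastRes l c a ∧ lastRes l c a < 4) := by
  induction l with
  | nil => intro a b; left; exact ⟨rfl, rfl⟩
  | cons p l ih =>
    intro a b
    rw [lastRes_cons, lastRes_cons]
    by_cases h : p.2 = c
    · rw [if_pos h, if_pos h]
      rcases ih (PySem.Int.mod p.1 4) (PySem.Int.mod p.1 4) with ⟨h1, _⟩ | ⟨_, h2, h3⟩
      · right
        have hb := mod4_bounds p.1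
        exact ⟨rfl, by rw [h1]; exact hb.1, by rw [h1]; exact hb.2⟩
      · right; exact ⟨rfl, h2, h3⟩
    · rw [if_neg h, if_neg h]
      exact ih a b

-- ===== conversion of A's pyRange folds to enumerate folds =====
lemma convert_pos (s : String) (d0 : PySem.Dict Char Int) :
    (PySem.List.pyRange 0 (PySem.Str.len s) 1).foldl (fun d i =>
        if d.contains (PySem.List.pyGetD s.toList i ' ') then
          d.insert (PySem.List.pyGetD s.toList i ' ') (PySem.Int.mod i 4)
        else d) d0
    = (enumL s).foldl posStep d0 := by
  rw [PySem.Str.len_eq, enumL,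
      PySem.List.enumerate_eq_map_pyRange s.toList ' ', List.foldl_map]
  rfl

lemma convert_bomb (s : String) (its : List (Char × Int)) (b0 : PySem.Dict Char Int) :
    (PySem.List.pyRange 0 (PySem.Str.len s) 1).foldl (fun b i =>
        if PySem.List.pyGetD s.toList i ' ' = '!' then
          its.foldl (fun b cp =>
            if cp.2 = PySem.Int.mod i 4 then b.insert cp.1 (b.getD cp.1 0 + 1) else b) b
        else b) b0
    = (enumL s).foldl (bombStep its) b0 := by
  rw [PySem.Str.len_eq, enumL,
      PySem.List.enumerate_eq_map_pyRange s.toList ' ', List.foldl_map]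
  rfl

lemma pyGetD_zeros (r : Int) (h0 : 0 ≤ r) (h4 : r < 4) :
    PySem.List.pyGetD ([0, 0, 0, 0] : List Int) r 0 = 0 := by
  interval_cases r <;> decide

-- ===== per-color agreement: the mathematical heart =====
lemma agree_color (e : List (Int × Char)) (x : Char) :
    bangCnt e (lastRes e x (-10))
      = (if 0 ≤ lastRes e x (-1) then
           PySem.List.pyGetD (e.foldl cntStep [0, 0, 0, 0]) (lastRes e x (-1)) 0
         else 0) := by
  rcases lastRes_cases e x (-10) (-1) with ⟨h1, h2⟩ | ⟨h1, h2, h3⟩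
  · rw [h1, h2, bangCnt_neg e (-10) (by norm_num), if_neg (by norm_num)]
  · rw [← h1, if_pos h2, cnt_getD e [0, 0, 0, 0] rfl _ h2 h3, pyGetD_zeros _ h2 h3,
        zero_add]

-- items of the two position dictionaries after the loop
lemma itemsA (s : String) :
    ((enumL s).foldl posStep
        (PySem.Dict.ofList [('R', (-10 : Int)), ('B', -10), ('Y', -10), ('G', -10)])).items
      = [('R', lastRes (enumL s) 'R' (-10)), ('B', lastRes (enumL s) 'B' (-10)),
         ('Y', lastRes (enumL s) 'Y' (-10)), ('G', lastRes (enumL s) 'G' (-10))] := by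
  rw [posi_items _ _ (by decide)]
  rfl

lemma itemsB (s : String) :
    ((enumL s).foldl posStep
        (PySem.Dict.ofList [('R', (-1 : Int)), ('B', -1), ('Y', -1), ('G', -1)])).items
      = [('R', lastRes (enumL s) 'R' (-1)), ('B', lastRes (enumL s) 'B' (-1)),
         ('Y', lastRes (enumL s) 'Y' (-1)), ('G', lastRes (enumL s) 'G' (-1))] := by
  rw [posi_items _ _ (by decide)]
  rfl

lemma getD_posB (s : String) (x : Char) (hx : x ∈ (['R', 'B', 'Y', 'G'] : List Char)) :
    ((enumL s).foldl posStep
        (PySem.Dict.ofList [('R', (-1 : Int)), ('B', -1), ('Y', -1), ('G', -1)])).getD x (-1)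
      = lastRes (enumL s) x (-1) := by
  have hnd : ((enumL s).foldl posStep
      (PySem.Dict.ofList [('R', (-1 : Int)), ('B', -1), ('Y', -1), ('G', -1)])).keys.Nodup := by
    simp only [PySem.Dict.keys, itemsB]
    simp
  fin_cases hx <;>
    exact PySem.Dict.getD_of_mem_items _ (by rw [itemsB]; simp) hnd _

lemma getD_bomb (s : String) (x : Char) (hx : x ∈ (['R', 'B', 'Y', 'G'] : List Char)) :
    ((enumL s).foldl
        (bombStep [('R', lastRes (enumL s) 'R' (-10)), ('B', lastRes (enumL s) 'B' (-10)),
                   ('Y', lastRes (enumL s) 'Y' (-10)), ('G', lastRes (enumL s) 'G' (-10))])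
        (PySem.Dict.ofList [('R', (0 : Int)), ('B', 0), ('Y', 0), ('G', 0)])).getD x 0
      = bangCnt (enumL s) (lastRes (enumL s) x (-10)) := by
  have hnd : (([('R', lastRes (enumL s) 'R' (-10)), ('B', lastRes (enumL s) 'B' (-10)),
      ('Y', lastRes (enumL s) 'Y' (-10)),
      ('G', lastRes (enumL s) 'G' (-10))]).map Prod.fst).Nodup := by
    simp
  have h0 : (PySem.Dict.ofList [('R', (0 : Int)), ('B', 0), ('Y', 0), ('G', 0)]).getD x 0
      = 0 := by
    fin_cases hx <;> decide
  fin_cases hx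
  · rw [bomb_getD (enumL s) _ _ 'R' (lastRes (enumL s) 'R' (-10)) (by simp) hnd, h0, zero_add]
  · rw [bomb_getD (enumL s) _ _ 'B' (lastRes (enumL s) 'B' (-10)) (by simp) hnd, h0, zero_add]
  · rw [bomb_getD (enumL s) _ _ 'Y' (lastRes (enumL s) 'Y' (-10)) (by simp) hnd, h0, zero_add]
  · rw [bomb_getD (enumL s) _ _ 'G' (lastRes (enumL s) 'G' (-10)) (by simp) hnd, h0, zero_add]

-- ===== VERDICT =====
theorem mueltos_spec : Claim_equal_mueltos := by
  intro s _
  show mueltos s = mueltos_alt s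
  simp only [mueltos, mueltos_alt]
  rw [convert_pos, convert_bomb, pairfold_split,
      posB_eq_posA _ _ (by decide), itemsA,
      show PySem.List.enumerate s.toList = enumL s from rfl]
  rw [getD_bomb s 'B' (by simp), getD_bomb s 'R' (by simp),
      getD_bomb s 'Y' (by simp), getD_bomb s 'G' (by simp),
      getD_posB s 'B' (by simp), getD_posB s 'R' (by simp),
      getD_posB s 'Y' (by simp), getD_posB s 'G' (by simp)]
  rw [← agree_color (enumL s) 'B', ← agree_color (enumL s) 'R',
      ← agree_color (enumL s) 'Y', ← agree_color (enumL s) 'G']
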